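-- pv_equiv track=rewrite | github.com/digitalpalidictionary/dpd-db | tools/pyglossary_stardict.py | ifo_from_opts
-- ===== SOURCE A (Python) =====
-- from typing import List, TypedDict, Optional
--
-- class StarDictIfo(TypedDict):
--     """
--     Available options:
--     ```
--     bookname=      // required
--     wordcount=     // required
--     synwordcount=  // required if ".syn" file exists.
--     idxfilesize=   // required
--     idxoffsetbits= // New in 3.0.0
--     author=
--     email=
--     website=
--     description= // You can use <br> for new line.
--     date=
--     sametypesequence= // very important.
--     dicttype=
--     ```
--     sametypesequence=m The data should be a utf-8 string ending with '\\0'.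
--     sametypesequence=h Html
--     Example contents of an .ifo file:
--     ```
--     StarDict's dict ifo file
--     version=3.0.0
--     bookname=Digital Pāli Dictionary
--     wordcount=36893
--     synwordcount=1727042
--     idxfilesize=747969
--     idxoffsetbits=32
--     author=Digital Pāli Tools <digitalpalitools@gmail.com>
--     website=https://github.com/digitalpalitools
--     description=The next generation comprehensive Digital Pāli Dictionary.
--     date=2021-10-31T08:56:25Z
--     sametypesequence=h
--     ```
--     """
--
--     version: str
--     bookname: str
--     wordcount: str
--     synwordcount: str
--     idxfilesize: str
--     idxoffsetbits: str
--     author: str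
--     email: str
--     website: str
--     description: str
--     date: str
--     sametypesequence: str
--     dicttype: str
--
-- def ifo_from_opts(opts: dict[str, str]) -> StarDictIfo:
--     ifo = StarDictIfo(
--         version='',
--         bookname='',
--         wordcount='',
--         synwordcount='',
--         idxfilesize='',
--         idxoffsetbits='',
--         author='',
--         email='',
--         website='',
--         description='',
--         date='',
--         sametypesequence='',
--         dicttype='',
--     )
--     for k in opts.keys():
--         if k in ifo.keys():
--             ifo[k] = opts[k]
--
--     return ifo
-- ===== SOURCE B (Python) =====
-- from typing import List, TypedDict, Optional
--
-- class StarDictIfo(TypedDict):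
--     version: str
--     bookname: str
--     wordcount: str
--     synwordcount: str
--     idxfilesize: str
--     idxoffsetbits: str
--     author: str
--     email: str
--     website: str
--     description: str
--     date: str
--     sametypesequence: str
--     dicttype: str
--
-- _IFO_KEYS = (
--     'version', 'bookname', 'wordcount', 'synwordcount', 'idxfilesize',
--     'idxoffsetbits', 'author', 'email', 'website', 'description',
--     'date', 'sametypesequence', 'dicttype',
-- )
--
-- def ifo_from_opts(opts: dict[str, str]) -> StarDictIfo:
--     return StarDictIfo(**{k: opts.get(k, '') for k in _IFO_KEYS})
-- ===== Notes on version B (the rewrite author's own statement) =====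
-- stated objective: simpler
-- what changed: Instead of pre-building a 13-field template dict and scanning every key of opts with a membership test against it, B iterates over the fixed tuple of 13 StarDict keys once and builds the result directly with opts.get(k, ''), so the opts scan disappears; cost becomes O(13 lookups) independent of len(opts).
import Mathlib
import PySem

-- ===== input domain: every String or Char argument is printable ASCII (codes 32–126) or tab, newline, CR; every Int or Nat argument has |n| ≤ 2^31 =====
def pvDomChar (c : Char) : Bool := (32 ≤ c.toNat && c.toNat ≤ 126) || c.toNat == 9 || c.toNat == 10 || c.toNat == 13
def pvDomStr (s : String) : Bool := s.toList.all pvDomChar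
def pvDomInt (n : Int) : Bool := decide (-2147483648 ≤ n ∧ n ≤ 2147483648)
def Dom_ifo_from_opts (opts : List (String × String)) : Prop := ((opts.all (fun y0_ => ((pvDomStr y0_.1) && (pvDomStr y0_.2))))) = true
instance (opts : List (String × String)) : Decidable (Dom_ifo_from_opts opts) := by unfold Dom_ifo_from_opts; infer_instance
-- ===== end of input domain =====

-- B replaces A's scan of opts (membership-tested against a 13-field template dict) by one pass
-- over the fixed list of 13 StarDict keys, reading opts.get(k, ''); simpler, return value identical.

-- ===== PORT A =====
-- the literal template dict A builds first (StarDictIfo(version='', …))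
def ifoTemplate : PySem.Dict String String := PySem.Dict.mk
  [("version", ""), ("bookname", ""), ("wordcount", ""), ("synwordcount", ""),
   ("idxfilesize", ""), ("idxoffsetbits", ""), ("author", ""), ("email", ""),
   ("website", ""), ("description", ""), ("date", ""), ("sametypesequence", ""),
   ("dicttype", "")]

def ifo_from_opts (opts : List (String × String)) : List (String × String) :=
  let d := PySem.Dict.ofList opts
  -- for k in opts.keys(): if k in ifo.keys(): ifo[k] = opts[k]
  (d.keys.foldl (fun ifo k =>
      if ifo.contains k then ifo.insert k (d.getD k "") else ifo) ifoTemplate).items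

-- ===== PORT B =====
def ifoKeys : List String :=
  ["version", "bookname", "wordcount", "synwordcount", "idxfilesize",
   "idxoffsetbits", "author", "email", "website", "description",
   "date", "sametypesequence", "dicttype"]

def ifo_from_opts_alt (opts : List (String × String)) : List (String × String) :=
  let d := PySem.Dict.ofList opts
  ifoKeys.map (fun k => (k, d.getD k ""))

-- ===== PRECONDITION & SPEC =====
def Spec_ifo_from_opts (opts : List (String × String)) (out : List (String × String)) : Prop := out = ifo_from_opts_alt opts
instance (opts : List (String × String)) (out : List (String × String)) : Decidable (Spec_ifo_from_opts opts out) := by unfold Spec_ifo_from_opts; infer_instance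

-- ===== CLAIM (what is proved, stated in full; the proofs are below) =====
def Claim_equal_ifo_from_opts : Prop := ∀ (opts : List (String × String)), Dom_ifo_from_opts opts → Spec_ifo_from_opts opts (ifo_from_opts opts)

-- ===== LEMMAS AND PROOFS =====

-- A's loop only overwrites existing keys, so the template's key list never changes
theorem pv_keys_foldl (g : String → String) (l : List String) (ifo : PySem.Dict String String) :
    (l.foldl (fun ifo k => if ifo.contains k then ifo.insert k (g k) else ifo) ifo).keys = ifo.keys := by
  induction l generalizing ifo with
  | nil => rfl
  | cons a l ih =>
    simp only [List.foldl_cons]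
    rw [ih]
    split_ifs with h
    · exact PySem.Dict.keys_insert_of_contains ifo (g a) h
    · rfl

-- lookup after A's loop: g k if k was seen and the template has it, else the template's value
theorem pv_getD_foldl (g : String → String) (l : List String) (ifo : PySem.Dict String String) (k : String) :
    (l.foldl (fun ifo k => if ifo.contains k then ifo.insert k (g k) else ifo) ifo).getD k "" =
      if k ∈ l ∧ ifo.contains k = true then g k else ifo.getD k "" := by
  induction l generalizing ifo with
  | nil => simp
  | cons a l ih =>
    simp only [List.foldl_cons]
    rw [ih]
    have hk2 : (if ifo.contains a = true then ifo.insert a (g a) else ifo).keys = ifo.keys := by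
      split_ifs with h
      · exact PySem.Dict.keys_insert_of_contains ifo (g a) h
      · rfl
    have hc : (if ifo.contains a = true then ifo.insert a (g a) else ifo).contains k
        = ifo.contains k := by
      rw [PySem.Dict.contains_eq_decide_mem_keys, hk2, ← PySem.Dict.contains_eq_decide_mem_keys]
    rw [hc]
    have hg : (if ifo.contains a = true then ifo.insert a (g a) else ifo).getD k ""
        = if k = a ∧ ifo.contains a = true then g a else ifo.getD k "" := by
      by_cases hca : ifo.contains a = true
      · simp only [hca, if_true, and_true]
        exact PySem.Dict.getD_insert ifo a k (g a) ""
      · simp only [Bool.not_eq_true] at hca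
        simp [hca]
    rw [hg]
    simp only [List.mem_cons]
    by_cases hka : k = a <;> by_cases hck : ifo.contains k = true <;>
      by_cases hkl : k ∈ l <;> subst_vars <;> simp_all

theorem ifo_from_opts_eq (opts : List (String × String)) :
    ifo_from_opts opts = ifo_from_opts_alt opts := by
  unfold ifo_from_opts ifo_from_opts_alt
  set d := PySem.Dict.ofList opts with hd
  set F := (d.keys.foldl (fun ifo k => if ifo.contains k then ifo.insert k (d.getD k "") else ifo) ifoTemplate) with hF
  have hkeys : F.keys = ifoKeys := by
    rw [hF, pv_keys_foldl]
    rfl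
  have hnd : F.keys.Nodup := by rw [hkeys]; decide
  rw [PySem.Dict.items_eq_map_keys F hnd ""]
  rw [hkeys]
  apply List.map_congr_left
  intro k hk
  have htpl : ∀ x ∈ ifoKeys, ifoTemplate.contains x = true ∧ ifoTemplate.getD x "" = "" := by decide
  obtain ⟨hct, htd⟩ := htpl k hk
  have hF' : F.getD k "" = if k ∈ d.keys ∧ ifoTemplate.contains k = true then d.getD k "" else ifoTemplate.getD k "" := by
    rw [hF, pv_getD_foldl]
  rw [hF', hct, htd]
  by_cases hm : k ∈ d.keys
  · simp [hm]
  · have hz : d.getD k "" = "" := by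
      apply PySem.Dict.getD_of_not_contains
      rw [PySem.Dict.contains_eq_decide_mem_keys]
      simp [hm]
    simp [hm, hz]

-- ===== VERDICT (by name: the statement is the Claim_ definition above) =====
theorem ifo_from_opts_spec : Claim_equal_ifo_from_opts := by
  intro opts _
  unfold Spec_ifo_from_opts
  exact ifo_from_opts_eq opts
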